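-- pv_equiv track=rewrite | github.com/Mulleky/px4-sitl-doctor | scripts/check_versions.py | known_px4_max
-- ===== SOURCE A (Python) =====
-- def _parse_semver(tag: str) -> tuple[int, int, int]:
--     """Convert 'v1.15.2' or '1.15.2' to (1, 15, 2). Returns (0,0,0) on parse error."""
--     tag = tag.lstrip("vV").split("-")[0]
--     parts = tag.split(".")
--     try:
--         major = int(parts[0]) if len(parts) > 0 else 0
--         minor = int(parts[1]) if len(parts) > 1 else 0
--         patch = int(parts[2]) if len(parts) > 2 else 0
--         return (major, minor, patch)
--     except (ValueError, IndexError):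
--         return (0, 0, 0)
--
-- def known_px4_max(matrix: dict) -> tuple[int, int, int]:
--     """Return the highest px4_max version tracked (None entries → treated as very high)."""
--     best = (0, 0, 0)
--     for combo in matrix.get("combos", []):
--         px4_max = combo.get("px4_max")
--         if px4_max is None:
--             return (999, 999, 999)  # open-ended
--         v = _parse_semver(str(px4_max))
--         if v > best:
--             best = v
--     return best
-- ===== SOURCE B (Python) =====
-- def _parse_semver(tag: str) -> tuple[int, int, int]:
--     """Convert 'v1.15.2' or '1.15.2' to (1, 15, 2). Returns (0,0,0) on parse error."""
--     tag = tag.lstrip("vV").split("-")[0]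
--     parts = tag.split(".")
--     try:
--         major = int(parts[0]) if len(parts) > 0 else 0
--         minor = int(parts[1]) if len(parts) > 1 else 0
--         patch = int(parts[2]) if len(parts) > 2 else 0
--         return (major, minor, patch)
--     except (ValueError, IndexError):
--         return (0, 0, 0)
--
-- def known_px4_max(matrix: dict) -> tuple[int, int, int]:
--     """Sort-then-pick: gather the px4_max fields, bail out if one is missing,
--     otherwise sort the parsed versions (seeded with (0,0,0)) and take the last."""
--     keys = [combo.get("px4_max") for combo in matrix.get("combos", [])]
--     if None in keys:
--         return (999, 999, 999)  # open-ended
--     return sorted([(0, 0, 0)] + [_parse_semver(str(k)) for k in keys])[-1]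
-- ===== Notes on version B (the rewrite author's own statement) =====
-- stated objective: alternative
-- what changed: Replaced A's fused running-max loop with early return by a staged pipeline: collect the px4_max fields, scan them for a missing one, then SORT the parsed versions (seeded with the zero version) and take the last element instead of maintaining a running maximum.
import Mathlib
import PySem

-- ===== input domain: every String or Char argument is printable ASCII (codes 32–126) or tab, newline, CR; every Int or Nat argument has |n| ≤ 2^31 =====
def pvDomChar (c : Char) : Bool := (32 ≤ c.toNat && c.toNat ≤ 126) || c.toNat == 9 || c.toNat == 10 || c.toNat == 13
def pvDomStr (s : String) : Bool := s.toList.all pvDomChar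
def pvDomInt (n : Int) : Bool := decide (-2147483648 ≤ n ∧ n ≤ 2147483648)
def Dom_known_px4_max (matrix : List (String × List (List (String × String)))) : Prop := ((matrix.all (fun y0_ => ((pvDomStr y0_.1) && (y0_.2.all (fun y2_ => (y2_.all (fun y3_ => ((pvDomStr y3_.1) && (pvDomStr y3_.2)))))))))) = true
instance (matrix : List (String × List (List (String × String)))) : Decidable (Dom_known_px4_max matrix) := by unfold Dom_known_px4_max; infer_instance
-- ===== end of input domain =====

-- B replaces A's fused running-max loop (with early return) by a staged pipeline that sorts the
-- parsed versions and takes the last element; objective: alternative (not faster).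
-- ===== PORT A =====
-- tag.lstrip("vV") ported by hand as dropWhile over the leading chars (exact: Python's lstrip(chars) drops leading chars in the set)
def pvParseSemver (tag : String) : Int × Int × Int :=
  let t := tag.toList.dropWhile (fun c => c == 'v' || c == 'V')
  let t := (PySem.Chars.splitOn t ['-']).headD []
  let parts := PySem.Chars.splitOn t ['.']
  -- try-block: each int() may raise ValueError; any failure yields (0,0,0)
  let major := if parts.length > 0 then PySem.Int.ofChars? (parts.getD 0 []) else some 0
  let minor := if parts.length > 1 then PySem.Int.ofChars? (parts.getD 1 []) else some 0
  let patch := if parts.length > 2 then PySem.Int.ofChars? (parts.getD 2 []) else some 0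
  match major, minor, patch with
  | some a, some b, some c => (a, b, c)
  | _, _, _ => (0, 0, 0)

-- Python tuple comparison a < b, lexicographic
def pvTripleLt (a b : Int × Int × Int) : Bool :=
  a.1 < b.1 || (a.1 == b.1 && (a.2.1 < b.2.1 || (a.2.1 == b.2.1 && a.2.2 < b.2.2)))

def pvLoopA : List (List (String × String)) → Int × Int × Int → Int × Int × Int
  | [], best => best
  | c :: rest, best =>
    match (PySem.Dict.mk c).get? "px4_max" with
    | none => (999, 999, 999)
    | some s =>
      let v := pvParseSemver s
      pvLoopA rest (if pvTripleLt best v then v else best)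

def known_px4_max (matrix : List (String × List (List (String × String)))) : Int × Int × Int :=
  pvLoopA ((PySem.Dict.mk matrix).getD "combos" []) (0, 0, 0)

-- ===== PORT B =====
-- Python's lexicographic order on int triples, as a sort key into the lexicographic product order
def pvKey (v : Int × Int × Int) : Lex (Int × Lex (Int × Int)) := toLex (v.1, toLex v.2)

def known_px4_max_alt (matrix : List (String × List (List (String × String)))) : Int × Int × Int :=
  let keys := ((PySem.Dict.mk matrix).getD "combos" []).map (fun c => (PySem.Dict.mk c).get? "px4_max")
  if keys.contains none then (999, 999, 999)
  else
    -- sorted([...]) on int triples = PySem.List.sorted with the lexicographic key pvKey;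
    -- the list is nonempty (seeded with (0,0,0)), so Python's [-1] is its last element (getLastD)
    (PySem.List.sorted ((0, 0, 0) :: keys.map (fun k => pvParseSemver (k.getD ""))) pvKey false).getLastD (0, 0, 0)

-- ===== PRECONDITION & SPEC =====
def Spec_known_px4_max (matrix : List (String × List (List (String × String)))) (out : Int × Int × Int) : Prop := out = known_px4_max_alt matrix
instance (matrix : List (String × List (List (String × String)))) (out : Int × Int × Int) : Decidable (Spec_known_px4_max matrix out) := by unfold Spec_known_px4_max; infer_instance

-- ===== CLAIM (what is proved, stated in full; the proofs are below) =====
def Claim_equal_known_px4_max : Prop := ∀ (matrix : List (String × List (List (String × String)))), Dom_known_px4_max matrix → Spec_known_px4_max matrix (known_px4_max matrix)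

-- ===== LEMMAS AND PROOFS =====
theorem pvKey_inj : Function.Injective pvKey := by
  intro a b h
  unfold pvKey at h
  simp [Prod.ext_iff] at h
  exact Prod.ext h.1 (Prod.ext h.2.1 h.2.2)

theorem pvTripleLt_iff (a b : Int × Int × Int) : pvTripleLt a b = true ↔ pvKey a < pvKey b := by
  simp [pvTripleLt, pvKey, Prod.Lex.toLex_lt_toLex]

-- A's running max is an element of a :: t whose key dominates a :: t
theorem pvFoldlA_max (t : List (Int × Int × Int)) : ∀ a : Int × Int × Int,
    t.foldl (fun b v => if pvTripleLt b v then v else b) a ∈ a :: t ∧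
    ∀ y ∈ a :: t, pvKey y ≤ pvKey (t.foldl (fun b v => if pvTripleLt b v then v else b) a) := by
  induction t with
  | nil => intro a; simp
  | cons v rest ih =>
    intro a
    by_cases h : pvTripleLt a v = true
    · have hk := (pvTripleLt_iff a v).1 h
      obtain ⟨hmem, hmax⟩ := ih v
      refine ⟨?_, ?_⟩
      · simp [List.foldl_cons, h]
        rcases List.mem_cons.1 hmem with h' | h'
        · exact Or.inr (Or.inl h')
        · exact Or.inr (Or.inr h')
      · intro y hy
        simp [List.foldl_cons, h]
        rcases List.mem_cons.1 hy with rfl | hy'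
        · exact le_of_lt (lt_of_lt_of_le hk (hmax v (List.mem_cons_self)))
        · exact hmax y hy'
    · have hk : ¬ pvKey a < pvKey v := fun hc => h ((pvTripleLt_iff a v).2 hc)
      obtain ⟨hmem, hmax⟩ := ih a
      refine ⟨?_, ?_⟩
      · simp [List.foldl_cons, h]
        rcases List.mem_cons.1 hmem with h' | h'
        · exact Or.inl h'
        · exact Or.inr (Or.inr h')
      · intro y hy
        simp [List.foldl_cons, h]
        rcases List.mem_cons.1 hy with rfl | hy'
        · exact hmax y (List.mem_cons_self)
        · rcases List.mem_cons.1 hy' with rfl | hy''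
          · exact le_trans (le_of_not_gt hk) (hmax a (List.mem_cons_self))
          · exact hmax y (List.mem_cons.2 (Or.inr hy''))

-- B's pick: the last element of sorted(l, key=pvKey) is an element of l whose key dominates l
theorem pvGetLastD_eq_getLast {a : Type} (s : List a) (h : s ≠ []) (d : a) : s.getLastD d = s.getLast h := by
  cases s with
  | nil => exact absurd rfl h
  | cons x xs => simp [List.getLastD_eq_getLast?, List.getLast?_eq_some_getLast]

theorem pvSortedLast_max (l : List (Int × Int × Int)) (hl : l ≠ []) (d : Int × Int × Int) :
    (PySem.List.sorted l pvKey false).getLastD d ∈ l ∧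
    ∀ y ∈ l, pvKey y ≤ pvKey ((PySem.List.sorted l pvKey false).getLastD d) := by
  have hsne : PySem.List.sorted l pvKey false ≠ [] :=
    fun h => hl ((PySem.List.sorted_eq_nil_iff l pvKey false).1 h)
  rw [pvGetLastD_eq_getLast _ hsne d]
  constructor
  · exact (PySem.List.mem_sorted l pvKey false _).1 (List.getLast_mem hsne)
  · intro y hy
    obtain ⟨p, hp, hpy⟩ := List.mem_iff_getElem.1 ((PySem.List.mem_sorted l pvKey false y).2 hy)
    rw [List.getLast_eq_getElem hsne, ← hpy]
    exact PySem.List.key_sorted_getElem_mono (key := pvKey) (p := p)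
      (q := (PySem.List.sorted l pvKey false).length - 1) (by omega) (by omega) (by omega)

theorem pvContains_none (l : List (List (String × String))) :
    (l.map (fun c => (PySem.Dict.mk c).get? "px4_max")).contains none
    = l.any (fun c => ((PySem.Dict.mk c).get? "px4_max").isNone) := by
  induction l with
  | nil => rfl
  | cons c rest ih =>
    cases h : (PySem.Dict.mk c).get? "px4_max" with
    | none => simp only [List.map_cons, List.contains_cons, List.any_cons, h]; simp
    | some s => simp only [List.map_cons, List.contains_cons, List.any_cons, h]; simpa using ih

-- A's loop equals: None-scan, then running max over the parsed list (shape shared by both sides)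
theorem pvLoopA_eq (combos : List (List (String × String))) :
    ∀ best, pvLoopA combos best =
      if combos.any (fun c => ((PySem.Dict.mk c).get? "px4_max").isNone) then (999, 999, 999)
      else (combos.map (fun c => pvParseSemver (((PySem.Dict.mk c).get? "px4_max").getD ""))).foldl
        (fun b v => if pvTripleLt b v then v else b) best := by
  induction combos with
  | nil => intro best; simp [pvLoopA]
  | cons c rest ih =>
    intro best
    cases h : (PySem.Dict.mk c).get? "px4_max" with
    | none => simp [pvLoopA, h]
    | some s => simp [pvLoopA, h, ih]

-- ===== VERDICT (by name: the statement is the Claim_ definition above) =====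
theorem known_px4_max_spec : Claim_equal_known_px4_max := by
  intro matrix _
  unfold Spec_known_px4_max known_px4_max known_px4_max_alt
  rw [pvLoopA_eq]
  simp only [pvContains_none, List.map_map, Function.comp_def]
  split_ifs with h
  · rfl
  · obtain ⟨hAmem, hAmax⟩ := pvFoldlA_max
      (((PySem.Dict.mk matrix).getD "combos" []).map
        (fun c => pvParseSemver (((PySem.Dict.mk c).get? "px4_max").getD ""))) (0, 0, 0)
    obtain ⟨hBmem, hBmax⟩ := pvSortedLast_max
      ((0, 0, 0) :: ((PySem.Dict.mk matrix).getD "combos" []).map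
        (fun c => pvParseSemver (((PySem.Dict.mk c).get? "px4_max").getD ""))) (by simp) (0, 0, 0)
    exact pvKey_inj (le_antisymm (hBmax _ hAmem) (hAmax _ hBmem))
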